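-- pv_equiv track=rewrite | github.com/maxmurtazin/Ant-RH | core/artin_symbolic_billiard.py | _minimal_period
-- ===== SOURCE A (Python) =====
-- from typing import Any, Dict, List, Tuple
--
-- def _minimal_period(a_list: List[int]) -> int:
--     L = len(a_list)
--     if L <= 1:
--         return L
--     for p in range(1, L):
--         if L % p != 0:
--             continue
--         ok = True
--         for i in range(L):
--             if a_list[i] != a_list[i % p]:
--                 ok = False
--                 break
--         if ok:
--             return p
--     return L
-- ===== SOURCE B (Python) =====
-- from typing import List
--
-- def _minimal_period(a_list: List[int]) -> int:
--     # Descending refinement: start from the trivial period L and divide out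
--     # factors q while the quotient still generates the whole list.  Correct
--     # because the divisor-periods of a list are closed under gcd, so the
--     # minimal one divides every other.
--     L = len(a_list)
--     if L <= 1:
--         return L
--     p = L
--     for q in range(2, L + 1):
--         while p % q == 0 and a_list == a_list[:p // q] * (L // (p // q)):
--             p //= q
--     return p
-- ===== Notes on version B (the rewrite author's own statement) =====
-- stated objective: alternative
-- what changed: B replaces A's ascending scan over candidate divisors (each verified by a modular index loop) with a descending refinement: start at p = L and divide out factors q = 2..L while the quotient block still tiles the list; correctness relies on the theorem (proved in the Lean file) that divisor-periods are closed under gcd, so the minimal one divides every other.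
import Mathlib
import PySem

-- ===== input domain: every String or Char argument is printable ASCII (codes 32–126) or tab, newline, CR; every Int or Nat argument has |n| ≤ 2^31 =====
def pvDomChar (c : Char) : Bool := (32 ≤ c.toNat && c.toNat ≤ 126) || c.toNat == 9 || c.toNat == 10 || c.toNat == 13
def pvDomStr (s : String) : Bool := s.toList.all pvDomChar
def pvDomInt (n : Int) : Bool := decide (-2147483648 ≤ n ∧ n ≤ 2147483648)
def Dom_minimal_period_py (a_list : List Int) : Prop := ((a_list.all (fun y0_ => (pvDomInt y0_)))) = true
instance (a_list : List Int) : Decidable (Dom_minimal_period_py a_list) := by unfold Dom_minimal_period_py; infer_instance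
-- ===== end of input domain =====

-- B replaces A's ascending divisor scan by descending factor refinement (divide p by factors
-- while the quotient block still tiles the list); an alternative algorithm, similar cost.
-- All loops are ported with a structural 'fuel' counter, a totality guard only: every caller
-- supplies enough fuel for the loop to run to its Python exit condition.

-- ===== PORT A =====
-- inner 'for i in range(L)' loop with its early break; a_list[i] and a_list[i % p] are always
-- in range here (i < L, i % p < p ≤ L), so List.getD is exact for Python's a_list[...]
def pvAInner (a_list : List Int) (p L i fuel : Nat) : Bool :=
  match fuel with
  | 0 => true
  | fuel + 1 =>
    if i < L then
      if a_list.getD i 0 ≠ a_list.getD (i % p) 0 then false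
      else pvAInner a_list p L (i + 1) fuel
    else true

-- outer 'for p in range(1, L)' loop: continue on L % p != 0, return p on ok, fall through to L
def pvAOuter (a_list : List Int) (L p fuel : Nat) : Int :=
  match fuel with
  | 0 => (L : Int)
  | fuel + 1 =>
    if p < L then
      if L % p ≠ 0 then pvAOuter a_list L (p + 1) fuel
      else if pvAInner a_list p L 0 L then (p : Int)
      else pvAOuter a_list L (p + 1) fuel
    else (L : Int)

def minimal_period_py (a_list : List Int) : Int :=
  let L := a_list.length
  if L ≤ 1 then (L : Int) else pvAOuter a_list L 1 L

-- ===== PORT B =====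
-- 'while p % q == 0 and a_list == a_list[:p // q] * (L // (p // q)): p //= q'
-- Python's 'a_list[:c] * k' is List.flatten (List.replicate k (a_list.take c)) (exact: c, k ≥ 0
-- always hold here); fuel = p bounds the iteration count (p shrinks strictly each pass)
def pvBInner (a_list : List Int) (L q p fuel : Nat) : Nat :=
  match fuel with
  | 0 => p
  | fuel + 1 =>
    if p % q = 0 ∧
        (a_list == List.flatten (List.replicate (L / (p / q)) (a_list.take (p / q)))) then
      pvBInner a_list L q (p / q) fuel
    else p

-- 'for q in range(2, L + 1)'
def pvBOuter (a_list : List Int) (L q p fuel : Nat) : Nat :=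
  match fuel with
  | 0 => p
  | fuel + 1 =>
    if q < L + 1 then pvBOuter a_list L (q + 1) (pvBInner a_list L q p p) fuel else p

def minimal_period_py_alt (a_list : List Int) : Int :=
  let L := a_list.length
  if L ≤ 1 then (L : Int) else (pvBOuter a_list L 2 L L : Int)

-- ===== PRECONDITION & SPEC =====
def Spec_minimal_period_py (a_list : List Int) (out : Int) : Prop := out = minimal_period_py_alt a_list
instance (a_list : List Int) (out : Int) : Decidable (Spec_minimal_period_py a_list out) := by unfold Spec_minimal_period_py; infer_instance

-- ===== CLAIM (what is proved, stated in full; the proofs are below) =====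
def Claim_equal_minimal_period_py : Prop := ∀ (a_list : List Int), Dom_minimal_period_py a_list → Spec_minimal_period_py a_list (minimal_period_py a_list)

-- ===== LEMMAS AND PROOFS =====

-- modular periodicity: the condition A's inner loop checks
def ModPer (a : List Int) (p : Nat) : Prop := ∀ i, i < a.length → a.getD i 0 = a.getD (i % p) 0

-- the minimal divisor-period, as a property
def IsLeastPer (a : List Int) (k : Nat) : Prop :=
  0 < k ∧ k ∣ a.length ∧ ModPer a k ∧ ∀ r, 0 < r → r ∣ a.length → ModPer a r → k ≤ r

-- the length-periodic extension of a
def pvExt (a : List Int) (i : Nat) : Int := a.getD (i % a.length) 0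

-- shift-periodicity of the extension
def ShiftPer (a : List Int) (k : Nat) : Prop := ∀ i, pvExt a (i + k) = pvExt a i

theorem shift_of_div (a : List Int) (p : Nat) (hL : 0 < a.length)
    (hd : p ∣ a.length) (hm : ModPer a p) : ShiftPer a p := by
  intro i
  unfold pvExt
  rw [hm ((i + p) % a.length) (Nat.mod_lt _ hL), hm (i % a.length) (Nat.mod_lt _ hL)]
  rw [Nat.mod_mod_of_dvd _ hd, Nat.mod_mod_of_dvd _ hd, Nat.add_mod_right]

theorem div_of_shift (a : List Int) (p : Nat) (hs : ShiftPer a p) : ModPer a p := by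
  intro i hi
  have key : ∀ k r, pvExt a (r + p * k) = pvExt a r := by
    intro k
    induction k with
    | zero => intro r; simp
    | succ k IH =>
      intro r
      have hr : r + p * (k + 1) = (r + p * k) + p := by ring
      rw [hr, hs (r + p * k), IH r]
  have h1 := key (i / p) (i % p)
  rw [Nat.mod_add_div i p] at h1
  unfold pvExt at h1
  rw [Nat.mod_eq_of_lt hi, Nat.mod_eq_of_lt (Nat.lt_of_le_of_lt (Nat.mod_le i p) hi)] at h1
  exact h1

theorem shift_mul (a : List Int) (p k : Nat) (hs : ShiftPer a p) : ShiftPer a (k * p) := by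
  induction k with
  | zero => intro i; simp
  | succ k IH =>
    intro i
    have hr : i + (k + 1) * p = (i + k * p) + p := by ring
    rw [hr, hs (i + k * p), IH i]

theorem shift_sub (a : List Int) (k k' : Nat) (hk : ShiftPer a k) (hk' : ShiftPer a k')
    (hle : k ≤ k') : ShiftPer a (k' - k) := by
  intro i
  have h1 := hk (i + (k' - k))
  have h2 : i + (k' - k) + k = i + k' := by omega
  rw [h2] at h1
  rw [← h1, hk' i]

theorem shift_mod (a : List Int) (p d : Nat) (hp : ShiftPer a p) (hd : ShiftPer a d) :
    ShiftPer a (d % p) := by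
  have h1 : ShiftPer a (d / p * p) := shift_mul a p (d / p) hp
  have h3 := Nat.mod_add_div d p
  have hc : p * (d / p) = d / p * p := Nat.mul_comm _ _
  have h2 : d % p = d - d / p * p := by omega
  rw [h2]
  exact shift_sub a (d / p * p) d h1 hd (Nat.div_mul_le_self d p)

theorem shift_gcd (a : List Int) (p d : Nat) (hp : ShiftPer a p) (hd : ShiftPer a d) :
    ShiftPer a (Nat.gcd p d) := by
  induction p, d using Nat.gcd.induction with
  | H0 d => rw [Nat.gcd_zero_left]; exact hd
  | H1 p d hpos IH =>
    rw [Nat.gcd_rec]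
    exact IH (shift_mod a p d hp hd) hp

-- the minimal divisor-period divides every divisor-period
theorem least_dvd (a : List Int) (m d : Nat) (hL : 0 < a.length) (hm : IsLeastPer a m)
    (hd0 : 0 < d) (hdL : d ∣ a.length) (hdm : ModPer a d) : m ∣ d := by
  obtain ⟨hm0, hmL, hmP, hleast⟩ := hm
  have hg : ShiftPer a (Nat.gcd m d) :=
    shift_gcd a m d (shift_of_div a m hL hmL hmP) (shift_of_div a d hL hdL hdm)
  have hg0 : 0 < Nat.gcd m d := Nat.gcd_pos_of_pos_left d hm0
  have hgP : ModPer a (Nat.gcd m d) := div_of_shift a _ hg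
  have hgL : Nat.gcd m d ∣ a.length := (Nat.gcd_dvd_left m d).trans hmL
  have h1 : m ≤ Nat.gcd m d := hleast _ hg0 hgL hgP
  have h2 : Nat.gcd m d ≤ m := Nat.le_of_dvd hm0 (Nat.gcd_dvd_left m d)
  have heq : Nat.gcd m d = m := le_antisymm h2 h1
  exact heq ▸ Nat.gcd_dvd_right m d

-- a period propagates upward to multiples
theorem per_up (a : List Int) (m e : Nat) (hmP : ModPer a m) (hme : m ∣ e) : ModPer a e := by
  intro i hi
  have h1 : a.getD i 0 = a.getD (i % m) 0 := hmP i hi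
  have h2 : a.getD (i % e) 0 = a.getD ((i % e) % m) 0 :=
    hmP (i % e) (Nat.lt_of_le_of_lt (Nat.mod_le i e) hi)
  rw [h1, h2, Nat.mod_mod_of_dvd _ hme]

-- A's inner loop decides the modular periodicity condition from index i on
theorem pvAInner_iff (a : List Int) (p L : Nat) :
    ∀ fuel i, L ≤ i + fuel →
    (pvAInner a p L i fuel = true ↔ (∀ j, i ≤ j → j < L → a.getD j 0 = a.getD (j % p) 0)) := by
  intro fuel
  induction fuel with
  | zero =>
    intro i hf
    simp only [pvAInner]
    exact ⟨fun _ j hij hj => by omega, fun _ => by trivial⟩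
  | succ fuel IH =>
    intro i hf
    simp only [pvAInner]
    by_cases h : i < L
    · rw [if_pos h]
      by_cases hne : a.getD i 0 ≠ a.getD (i % p) 0
      · rw [if_pos hne]
        constructor
        · intro hfalse; cases hfalse
        · intro hall; exact absurd (hall i le_rfl h) hne
      · rw [if_neg hne]
        rw [not_not] at hne
        rw [IH (i + 1) (by omega)]
        constructor
        · intro hall j hij hj
          rcases Nat.eq_or_lt_of_le hij with rfl | hlt
          · exact hne
          · exact hall j hlt hj
        · intro hall j hij hj
          exact hall j (Nat.le_of_succ_le hij) hj
    · rw [if_neg h]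
      exact ⟨fun _ j hij hj => by omega, fun _ => by trivial⟩

-- A's outer loop returns the least divisor-period, given none below p exists
theorem pvAOuter_least (a : List Int) :
    ∀ fuel p, 1 ≤ p → p ≤ a.length → a.length ≤ p + fuel →
    (∀ r, 0 < r → r < p → ¬(r ∣ a.length ∧ ModPer a r)) →
    ∃ k : Nat, pvAOuter a a.length p fuel = (k : Int) ∧ IsLeastPer a k := by
  intro fuel
  induction fuel with
  | zero =>
    intro p hp hpL hf hbelow
    simp only [pvAOuter]
    refine ⟨a.length, rfl, by omega, dvd_rfl, ?_, ?_⟩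
    · intro i hi; rw [Nat.mod_eq_of_lt hi]
    · intro r hr0 hrL hrP
      by_contra hlt
      exact hbelow r hr0 (by omega) ⟨hrL, hrP⟩
  | succ fuel IH =>
    intro p hp hpL hf hbelow
    simp only [pvAOuter]
    by_cases h : p < a.length
    · rw [if_pos h]
      by_cases hdvd : a.length % p = 0
      · have hdvd' : p ∣ a.length := Nat.dvd_iff_mod_eq_zero.mpr hdvd
        by_cases hok : pvAInner a p a.length 0 a.length = true
        · refine ⟨p, by simp [hdvd, hok], hp, hdvd', ?_, ?_⟩
          · intro i hi
            exact (pvAInner_iff a p a.length a.length 0 (by omega)).mp hok i (Nat.zero_le i) hi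
          · intro r hr0 hrL hrP
            by_contra hlt
            exact hbelow r hr0 (by omega) ⟨hrL, hrP⟩
        · have hok' : pvAInner a p a.length 0 a.length = false := by
            cases hb : pvAInner a p a.length 0 a.length
            · rfl
            · exact absurd hb hok
          simp only [hdvd, ne_eq, not_true_eq_false, if_false, hok', Bool.false_eq_true]
          refine IH (p + 1) (by omega) (by omega) (by omega) ?_
          intro r hr0 hrp hand
          rcases Nat.lt_or_ge r p with hlt | hge
          · exact hbelow r hr0 hlt hand
          · have hreq : r = p := by omega
            rw [hreq] at hand
            exact hok ((pvAInner_iff a p a.length a.length 0 (by omega)).mpr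
              (fun j _ hj => hand.2 j hj))
      · simp only [hdvd, ne_eq, not_false_eq_true, if_true]
        refine IH (p + 1) (by omega) (by omega) (by omega) ?_
        intro r hr0 hrp hand
        rcases Nat.lt_or_ge r p with hlt | hge
        · exact hbelow r hr0 hlt hand
        · have hreq : r = p := by omega
          rw [hreq] at hand
          exact hdvd (Nat.dvd_iff_mod_eq_zero.mp hand.1)
    · rw [if_neg h]
      refine ⟨a.length, rfl, by omega, dvd_rfl, ?_, ?_⟩
      · intro i hi; rw [Nat.mod_eq_of_lt hi]
      · intro r hr0 hrL hrP
        by_contra hlt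
        exact hbelow r hr0 (by omega) ⟨hrL, hrP⟩

-- length of a repeated block
theorem rep_length (xs : List Int) (n : Nat) :
    (List.flatten (List.replicate n xs)).length = n * xs.length := by
  induction n with
  | zero => simp
  | succ n IH =>
    rw [List.replicate_succ, List.flatten_cons, List.length_append, IH]
    ring

-- indexing a repeated block
theorem rep_getD (xs : List Int) (n : Nat) :
    ∀ i, i < n * xs.length →
    (List.flatten (List.replicate n xs)).getD i 0 = xs.getD (i % xs.length) 0 := by
  induction n with
  | zero => intro i hi; rw [Nat.zero_mul] at hi; omega
  | succ n IH =>
    intro i hi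
    rw [List.replicate_succ, List.flatten_cons]
    by_cases h : i < xs.length
    · rw [List.getD_append _ _ _ _ h, Nat.mod_eq_of_lt h]
    · have hx : 0 < xs.length := by
        rcases Nat.eq_zero_or_pos xs.length with h0 | h0
        · rw [h0, Nat.mul_zero] at hi; omega
        · exact h0
      have hi' : i < n * xs.length + xs.length := by
        have harith : (n + 1) * xs.length = n * xs.length + xs.length := by ring
        omega
      rw [List.getD_append_right _ _ _ _ (by omega : xs.length ≤ i)]
      rw [IH (i - xs.length) (by omega)]
      congr 1
      conv_rhs => rw [show i = (i - xs.length) + xs.length from by omega]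
      rw [Nat.add_mod_right]

theorem getD_take (a : List Int) (c j : Nat) (hj : j < c) (hja : j < a.length) :
    (a.take c).getD j 0 = a.getD j 0 := by
  rw [List.getD_eq_getElem _ _ (by simp; omega), List.getD_eq_getElem _ _ hja]
  simp

-- the block-tiling check B performs decides modular periodicity (for divisors of the length)
theorem check_iff (a : List Int) (c : Nat) (hc0 : 0 < c) (hcL : c ∣ a.length) :
    (a = List.flatten (List.replicate (a.length / c) (a.take c))) ↔ ModPer a c := by
  by_cases hL : a.length = 0
  · have ha : a = [] := List.eq_nil_of_length_eq_zero hL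
    subst ha
    simp [ModPer]
  · have hL0 : 0 < a.length := by omega
    have hcle : c ≤ a.length := Nat.le_of_dvd hL0 hcL
    have htake : (a.take c).length = c := by simp [Nat.min_eq_left hcle]
    have hlen : a.length / c * c = a.length := Nat.div_mul_cancel hcL
    constructor
    · intro heq i hi
      have h1 : a.getD i 0 = (a.take c).getD (i % (a.take c).length) 0 := by
        conv_lhs => rw [heq]
        exact rep_getD (a.take c) (a.length / c) i (by rw [htake, hlen]; exact hi)
      rw [htake] at h1
      rw [h1, getD_take a c (i % c) (Nat.mod_lt _ hc0)
        (Nat.lt_of_le_of_lt (Nat.mod_le i c) hi)]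
    · intro hP
      apply List.ext_getElem
      · rw [rep_length, htake, hlen]
      · intro j h1 h2
        rw [← List.getD_eq_getElem a 0 h1, ← List.getD_eq_getElem _ 0 h2]
        rw [rep_getD (a.take c) (a.length / c) j (by rw [htake, hlen]; exact h1), htake]
        rw [getD_take a c (j % c) (Nat.mod_lt _ hc0)
          (Nat.lt_of_le_of_lt (Nat.mod_le j c) h1)]
        exact hP j h1

-- B's inner loop: divides out q while legal; afterwards q no longer divides p / m
theorem pvBInner_spec (a : List Int) (m q : Nat) (hL : 0 < a.length)
    (hm : IsLeastPer a m) (hq : 2 ≤ q) :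
    ∀ fuel p, 0 < p → m ∣ p → p ∣ a.length → p ≤ fuel →
    0 < pvBInner a a.length q p fuel ∧ m ∣ pvBInner a a.length q p fuel ∧
    pvBInner a a.length q p fuel ∣ p ∧ ¬ q ∣ (pvBInner a a.length q p fuel / m) := by
  intro fuel
  induction fuel with
  | zero => intro p hp0 _ _ hf; omega
  | succ fuel IH =>
    intro p hp0 hmp hpL hf
    simp only [pvBInner]
    by_cases h : p % q = 0 ∧
        (a == List.flatten (List.replicate (a.length / (p / q)) (a.take (p / q)))) = true
    · rw [if_pos h]
      obtain ⟨hmod, hcheck⟩ := h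
      have hqp : q ∣ p := Nat.dvd_iff_mod_eq_zero.mpr hmod
      obtain ⟨t, ht⟩ := hqp
      have hc : p / q = t := by rw [ht, Nat.mul_div_cancel_left t (by omega)]
      have ht0 : 0 < t := by
        rcases Nat.eq_zero_or_pos t with h0 | h0
        · rw [h0, Nat.mul_zero] at ht; omega
        · exact h0
      have hlt : p / q < p := by
        rw [hc, ht]
        have h1 := mul_lt_mul_of_pos_right (show (1 : Nat) < q from by omega) ht0
        simpa using h1
      have hcdvd : p / q ∣ p := by rw [hc]; exact ⟨q, by rw [ht]; ring⟩
      have hcL : p / q ∣ a.length := hcdvd.trans hpL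
      have hcP : ModPer a (p / q) := by
        have heq := (beq_iff_eq).mp hcheck
        exact (check_iff a (p / q) (by omega) hcL).mp heq
      have hmc : m ∣ p / q := least_dvd a m (p / q) hL hm (by omega) hcL hcP
      have IH' := IH (p / q) (by omega) hmc hcL (by omega)
      exact ⟨IH'.1, IH'.2.1, IH'.2.2.1.trans hcdvd, IH'.2.2.2⟩
    · rw [if_neg h]
      refine ⟨hp0, hmp, dvd_rfl, ?_⟩
      intro hqpm
      obtain ⟨hm0, hmL, hmP, -⟩ := hm
      obtain ⟨u, hu⟩ := hmp
      have hum : p / m = u := by rw [hu, Nat.mul_div_cancel_left u hm0]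
      obtain ⟨t, htu⟩ : q ∣ u := hum ▸ hqpm
      have hpqm : p / q = m * t := by
        rw [hu, htu, show m * (q * t) = q * (m * t) from by ring,
          Nat.mul_div_cancel_left _ (by omega : 0 < q)]
      have ht0 : 0 < t := by
        rcases Nat.eq_zero_or_pos t with h0 | h0
        · rw [h0, Nat.mul_zero] at htu; rw [htu, Nat.mul_zero] at hu; omega
        · exact h0
      have hc0 : 0 < p / q := by rw [hpqm]; positivity
      have hcdvd : p / q ∣ p := by
        rw [hpqm, hu, htu]
        exact ⟨q, by ring⟩
      have hcL : p / q ∣ a.length := hcdvd.trans hpL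
      have hcP : ModPer a (p / q) := per_up a m (p / q) hmP ⟨t, hpqm⟩
      have hcheck : (a == List.flatten (List.replicate (a.length / (p / q)) (a.take (p / q)))) = true :=
        beq_iff_eq.mpr ((check_iff a (p / q) hc0 hcL).mpr hcP)
      have hmod : p % q = 0 := Nat.dvd_iff_mod_eq_zero.mp (by rw [hu, htu]; exact ⟨m * t, by ring⟩)
      exact h ⟨hmod, hcheck⟩

-- once every factor 2..L has been tried, p has shrunk to the minimal divisor-period
theorem pvB_final (a : List Int) (m p : Nat) (hL : 0 < a.length) (hm0 : 0 < m)
    (hp0 : 0 < p) (hmp : m ∣ p) (hpL : p ∣ a.length)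
    (hclean : ∀ r, 2 ≤ r → r < a.length + 1 → ¬ r ∣ (p / m)) : p = m := by
  obtain ⟨u, hu⟩ := hmp
  have hum : p / m = u := by rw [hu, Nat.mul_div_cancel_left u hm0]
  have hu0 : 0 < u := by
    rcases Nat.eq_zero_or_pos u with h0 | h0
    · rw [h0, Nat.mul_zero] at hu; omega
    · exact h0
  rcases Nat.lt_or_ge u 2 with h2 | h2
  · have hu1 : u = 1 := by omega
    rw [hu, hu1, Nat.mul_one]
  · exfalso
    have hple : p ≤ a.length := Nat.le_of_dvd hL hpL
    have hup : u ≤ p := by rw [hu]; exact Nat.le_mul_of_pos_left u hm0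
    exact hclean u h2 (by omega) (hum ▸ dvd_rfl)

-- B's outer loop drives p down to the minimal divisor-period
theorem pvBOuter_spec (a : List Int) (m : Nat) (hL : 0 < a.length) (hm : IsLeastPer a m) :
    ∀ fuel q p, 2 ≤ q → 0 < p → m ∣ p → p ∣ a.length → a.length + 1 ≤ q + fuel →
    (∀ r, 2 ≤ r → r < q → ¬ r ∣ (p / m)) →
    pvBOuter a a.length q p fuel = m := by
  intro fuel
  induction fuel with
  | zero =>
    intro q p hq hp0 hmp hpL hf hclean
    simp only [pvBOuter]
    exact pvB_final a m p hL hm.1 hp0 hmp hpL (fun r h2 hr => hclean r h2 (by omega))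
  | succ fuel IH =>
    intro q p hq hp0 hmp hpL hf hclean
    simp only [pvBOuter]
    by_cases h : q < a.length + 1
    · rw [if_pos h]
      obtain ⟨hp'0, hmp', hp'p, hq'⟩ := pvBInner_spec a m q hL hm hq p p hp0 hmp hpL le_rfl
      refine IH (q + 1) _ (by omega) hp'0 hmp' (hp'p.trans hpL) (by omega) ?_
      intro r hr2 hrq hdvd
      rcases Nat.lt_or_ge r q with hlt | hge
      · refine hclean r hr2 hlt ?_
        obtain ⟨u, hu⟩ := hmp'
        obtain ⟨s, hs⟩ := hp'p
        have hm0 : 0 < m := hm.1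
        have h1 : pvBInner a a.length q p p / m = u := by
          rw [hu, Nat.mul_div_cancel_left u hm0]
        have h2 : p / m = u * s := by
          rw [hs, hu, show m * u * s = m * (u * s) from by ring, Nat.mul_div_cancel_left _ hm0]
        rw [h2]
        rw [h1] at hdvd
        exact hdvd.mul_right s
      · have hreq : r = q := by omega
        rw [hreq] at hdvd
        exact hq' hdvd
    · rw [if_neg h]
      exact pvB_final a m p hL hm.1 hp0 hmp hpL (fun r h2 hr => hclean r h2 (by omega))

-- ===== VERDICT (by name: the statement is the Claim_ definition above) =====
theorem minimal_period_py_spec : Claim_equal_minimal_period_py := by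
  intro a _
  unfold Spec_minimal_period_py minimal_period_py minimal_period_py_alt
  by_cases h : a.length ≤ 1
  · simp [h]
  · rw [if_neg h, if_neg h]
    have hL : 0 < a.length := by omega
    obtain ⟨k, hk, hleast⟩ := pvAOuter_least a a.length 1 le_rfl (by omega) (by omega)
      (fun r hr0 hr1 _ => by omega)
    rw [hk]
    have hB := pvBOuter_spec a k hL hleast a.length 2 a.length le_rfl hL hleast.2.1 dvd_rfl
      (by omega) (fun r h2 hr2 => by omega)
    rw [hB]
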